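-- pv_equiv track=rewrite | github.com/MrBrantCode/unitest_baseline | mut_generate/mist_train_taco/taco_12626/solution.py | has_continuous_subarray_sum
-- ===== SOURCE A (Python) =====
-- def has_continuous_subarray_sum(nums, k):
--     if k == 0:
--         j = 0
--         for i in range(len(nums)):
--             if nums[i] == 0:
--                 if j < i:
--                     return True
--             else:
--                 j = i + 1
--         return False
--
--     dic = {0: -1}
--     c = 0
--     for i in range(len(nums)):
--         c = (c + nums[i]) % k
--         if c in dic:
--             if i - dic[c] > 1:
--                 return True
--         else:
--             dic[c] = i
--     return False
-- ===== SOURCE B (Python) =====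
-- def has_continuous_subarray_sum(nums, k):
--     if k == 0:
--         return any(x == 0 and y == 0 for x, y in zip(nums, nums[1:]))
--     for i in range(len(nums)):
--         s = nums[i]
--         for x in nums[i + 1:]:
--             s += x
--             if s % k == 0:
--                 return True
--     return False
-- ===== Notes on version B (the rewrite author's own statement) =====
-- stated objective: alternative
-- what changed: For k != 0 the one-pass hashmap of first prefix-remainder occurrences is replaced by a naive nested scan accumulating running sums over every start index, and the k == 0 consecutive-zeros state machine is replaced by an adjacent-pair any() over zip(nums, nums[1:]).
import Mathlib
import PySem

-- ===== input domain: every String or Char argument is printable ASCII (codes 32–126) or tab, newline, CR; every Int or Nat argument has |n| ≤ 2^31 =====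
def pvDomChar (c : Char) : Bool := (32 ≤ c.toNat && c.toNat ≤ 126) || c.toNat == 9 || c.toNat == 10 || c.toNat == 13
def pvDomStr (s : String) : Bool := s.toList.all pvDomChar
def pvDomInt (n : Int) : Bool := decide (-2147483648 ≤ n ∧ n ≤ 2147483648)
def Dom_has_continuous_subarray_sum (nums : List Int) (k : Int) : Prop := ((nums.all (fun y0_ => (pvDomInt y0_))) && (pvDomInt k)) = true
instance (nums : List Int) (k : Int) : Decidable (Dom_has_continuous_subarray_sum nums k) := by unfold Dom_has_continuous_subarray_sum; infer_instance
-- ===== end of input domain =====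

-- B answers the same question by a naive nested scan over start/end positions instead of
-- A's single pass with a dict of first prefix-remainder occurrences (objective: alternative;
-- B is not faster).

-- ===== PORT A =====
-- k == 0 branch of A: j is the index just after the last nonzero element; early return by recursion
def hcssAZero : List Int → Int → Int → Bool
  | [], _, _ => false
  | x :: rest, i, j =>
    if x == 0 then (if j < i then true else hcssAZero rest (i + 1) j)
    else hcssAZero rest (i + 1) (i + 1)

-- k != 0 branch of A: single pass, dict of first occurrences of each prefix remainder
def hcssALoop (k : Int) : List Int → Int → PySem.Dict Int Int → Int → Bool
  | [], _, _, _ => false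
  | x :: rest, i, dic, c =>
    let c' := PySem.Int.mod (c + x) k
    if dic.contains c' then
      (if i - dic.getD c' 0 > 1 then true else hcssALoop k rest (i + 1) dic c')
    else hcssALoop k rest (i + 1) (dic.insert c' i) c'

def has_continuous_subarray_sum (nums : List Int) (k : Int) : Bool :=
  if k == 0 then hcssAZero nums 0 0
  else hcssALoop k nums 0 (PySem.Dict.empty.insert 0 (-1)) 0

-- ===== PORT B =====
-- inner loop of B: s accumulates, return True as soon as s % k == 0
def hcssBInner (k : Int) : Int → List Int → Bool
  | _, [] => false
  | s, x :: rest =>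
    let s' := s + x
    if PySem.Int.mod s' k == 0 then true else hcssBInner k s' rest

-- outer loop of B over the start positions (the suffixes of nums)
def hcssBOuter (k : Int) : List Int → Bool
  | [] => false
  | x :: rest => hcssBInner k x rest || hcssBOuter k rest

def has_continuous_subarray_sum_alt (nums : List Int) (k : Int) : Bool :=
  if k == 0 then (nums.zip (nums.drop 1)).any (fun p => p.1 == 0 && p.2 == 0)  -- nums[1:] = drop 1
  else hcssBOuter k nums

-- ===== PRECONDITION & SPEC =====
def Spec_has_continuous_subarray_sum (nums : List Int) (k : Int) (out : Bool) : Prop := out = has_continuous_subarray_sum_alt nums k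
instance (nums : List Int) (k : Int) (out : Bool) : Decidable (Spec_has_continuous_subarray_sum nums k out) := by unfold Spec_has_continuous_subarray_sum; infer_instance

-- ===== CLAIM (what is proved, stated in full; the proofs are below) =====
def Claim_equal_has_continuous_subarray_sum : Prop := ∀ (nums : List Int) (k : Int), Dom_has_continuous_subarray_sum nums k → Spec_has_continuous_subarray_sum nums k (has_continuous_subarray_sum nums k)

-- ===== LEMMAS AND PROOFS =====

-- first element == 0, as a Bool
def pvHeadZero : List Int → Bool
  | [] => false
  | x :: _ => x == 0

-- prefix sum of the first m elements, and its Python remainder mod k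
def pvPre (nums : List Int) (m : Nat) : Int := (nums.take m).sum
def pvR (nums : List Int) (k : Int) (m : Nat) : Int := PySem.Int.mod (pvPre nums m) k

lemma pvModEq (k a b : Int) (hk : k ≠ 0) :
    PySem.Int.mod a k = PySem.Int.mod b k ↔ k ∣ (a - b) := by
  have ha := PySem.Int.floordiv_mul_add_mod a k
  have hb := PySem.Int.floordiv_mul_add_mod b k
  constructor
  · intro h
    exact ⟨PySem.Int.floordiv a k - PySem.Int.floordiv b k, by linear_combination hb - ha + h⟩
  · rintro ⟨c, hc⟩
    have hd : k ∣ (PySem.Int.mod a k - PySem.Int.mod b k) :=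
      ⟨c - PySem.Int.floordiv a k + PySem.Int.floordiv b k, by linear_combination hc + ha - hb⟩
    rcases lt_or_gt_of_ne hk with hneg | hpos
    · have h1 := PySem.Int.mod_neg_bounds a hneg
      have h2 := PySem.Int.mod_neg_bounds b hneg
      have h0 := Int.eq_zero_of_abs_lt_dvd ((neg_dvd).mpr hd) (by rw [abs_lt]; omega)
      omega
    · have h1 := PySem.Int.mod_nonneg a hpos
      have h2 := PySem.Int.mod_nonneg b hpos
      have h3 := PySem.Int.mod_lt a hpos
      have h4 := PySem.Int.mod_lt b hpos
      have h0 := Int.eq_zero_of_abs_lt_dvd hd (by rw [abs_lt]; omega)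
      omega

lemma pvModAdd (k a b : Int) (hk : k ≠ 0) :
    PySem.Int.mod (PySem.Int.mod a k + b) k = PySem.Int.mod (a + b) k := by
  have ha := PySem.Int.floordiv_mul_add_mod a k
  exact (pvModEq k _ _ hk).mpr ⟨-PySem.Int.floordiv a k, by linear_combination ha⟩

lemma pvPre_succ (nums : List Int) (t : Nat) (ht : t < nums.length) :
    pvPre nums (t + 1) = pvPre nums t + nums[t] := by
  rw [pvPre, pvPre, List.sum_take_succ nums t ht]

lemma pvSum_drop_take (nums : List Int) (a c : Nat) :
    ((nums.drop a).take c).sum = pvPre nums (a + c) - pvPre nums a := by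
  rw [pvPre, pvPre, List.take_add, List.sum_append]; ring

-- A's k == 0 loop detects exactly a pair of adjacent zeros (plus the pending j < i state)
lemma pvAZero (nums : List Int) : ∀ (i j : Int), j ≤ i →
    hcssAZero nums i j =
      ((decide (j < i) && pvHeadZero nums) ||
        (nums.zip (nums.drop 1)).any (fun p => p.1 == 0 && p.2 == 0)) := by
  induction nums with
  | nil => intro i j _; simp [hcssAZero, pvHeadZero]
  | cons x rest IH =>
    intro i j hji
    by_cases hx : x = 0
    · subst hx
      by_cases hlt : j < i
      · simp [hcssAZero, hlt, pvHeadZero]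
      · rw [hcssAZero]
        simp only [beq_self_eq_true, if_true, if_neg hlt]
        rw [IH (i + 1) j (by omega)]
        have hd1 : decide (j < i + 1) = true := by simp; omega
        have hd2 : decide (j < i) = false := by simp; omega
        rw [hd1, hd2]
        simp only [Bool.false_and, Bool.false_or, Bool.true_and]
        cases rest with
        | nil => simp [pvHeadZero]
        | cons y r => simp [pvHeadZero]
    · rw [hcssAZero]
      simp only [beq_iff_eq, if_neg hx]
      rw [IH (i + 1) (i + 1) le_rfl]
      have hd : decide ¬(i + 1 < i + 1) = true := by simp
      simp only [lt_irrefl, decide_false, Bool.false_and, Bool.false_or]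
      have hhz : pvHeadZero (x :: rest) = false := by simp [pvHeadZero, hx]
      rw [hhz]
      simp only [Bool.and_false, Bool.false_or]
      cases rest with
      | nil => simp
      | cons y r => simp [hx]

-- the invariant-carrying characterisation of A's k != 0 loop
lemma pvALoop (nums : List Int) (k : Int) (hk : k ≠ 0) :
    ∀ (rest : List Int) (t : Nat) (dic : PySem.Dict Int Int),
    rest = nums.drop t →
    (∀ key, dic.get? key =
      (((List.range (t + 1)).find? (fun m => pvR nums k m == key)).map (fun (m : Nat) => (m : Int) - 1))) →
    (∀ m' m : Nat, m' + 2 ≤ m → m ≤ t → pvR nums k m' ≠ pvR nums k m) →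
    (hcssALoop k rest (t : Int) dic (pvR nums k t) = true ↔
      ∃ m' m : Nat, m' + 2 ≤ m ∧ m ≤ nums.length ∧ t < m ∧ pvR nums k m' = pvR nums k m) := by
  intro rest
  induction rest with
  | nil =>
    intro t dic ht _ _
    have hlen : nums.length ≤ t := List.drop_eq_nil_iff.mp ht.symm
    constructor
    · intro h; cases h
    · rintro ⟨m', m, h1, h2, h3, _⟩; omega
  | cons x rest IH =>
    intro t dic ht hdic hnp
    have ht' : t < nums.length := by
      by_contra h
      rw [List.drop_eq_nil_iff.mpr (by omega)] at ht; cases ht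
    have hd := List.drop_eq_getElem_cons ht'
    rw [hd] at ht
    obtain ⟨hx, hrest⟩ : x = nums[t] ∧ rest = nums.drop (t + 1) := by
      injection ht with h1 h2; exact ⟨h1, h2⟩
    have hc' : PySem.Int.mod (pvR nums k t + x) k = pvR nums k (t + 1) := by
      rw [pvR, pvR, pvModAdd k _ _ hk, hx, ← pvPre_succ nums t ht']
    have hcast : ((t : Int) + 1) = ((t + 1 : Nat) : Int) := by push_cast; ring
    rw [hcssALoop]
    simp only [hc']
    cases hfind : (List.range (t + 1)).find? (fun m => pvR nums k m == pvR nums k (t + 1)) with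
    | none =>
      have hget : dic.get? (pvR nums k (t + 1)) = none := by rw [hdic, hfind]; rfl
      have hnone : ∀ m : Nat, m ≤ t → pvR nums k m ≠ pvR nums k (t + 1) := by
        intro m hm
        have := List.find?_eq_none.mp hfind m (List.mem_range.mpr (by omega))
        simpa using this
      have hcont : dic.contains (pvR nums k (t + 1)) = false := by
        rw [PySem.Dict.contains_eq_isSome_get?, hget]; rfl
      rw [hcont]
      simp only [Bool.false_eq_true, if_false]
      rw [hcast]
      rw [IH (t + 1) (dic.insert (pvR nums k (t + 1)) (t : Int)) hrest ?_ ?_]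
      · constructor
        · rintro ⟨m', m, h1, h2, h3, h4⟩; exact ⟨m', m, h1, h2, by omega, h4⟩
        · rintro ⟨m', m, h1, h2, h3, h4⟩
          by_cases hm : m = t + 1
          · subst hm; exact absurd h4 (hnone m' (by omega))
          · exact ⟨m', m, h1, h2, by omega, h4⟩
      · intro key
        rw [PySem.Dict.get?_insert]
        conv_rhs => rw [List.range_succ, List.find?_append]
        by_cases hkey : key = pvR nums k (t + 1)
        · subst hkey
          rw [if_pos rfl, hfind]
          simp [List.find?]
        · rw [if_neg hkey, hdic key]
          have hne : (pvR nums k (t + 1) == key) = false :=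
            beq_eq_false_iff_ne.mpr (fun h => hkey h.symm)
          simp [List.find?, hne]
      · intro m' m h2 hm hr
        by_cases hm' : m ≤ t
        · exact hnp m' m h2 hm' hr
        · have : m = t + 1 := by omega
          subst this
          exact hnone m' (by omega) hr
    | some m₀ =>
      have hget : dic.get? (pvR nums k (t + 1)) = some ((m₀ : Int) - 1) := by
        rw [hdic, hfind]; rfl
      obtain ⟨hp, i, hi, hig, hmin⟩ := List.find?_eq_some_iff_getElem.mp hfind
      rw [List.getElem_range] at hig
      subst hig
      rw [List.length_range] at hi
      have hm₀r : pvR nums k i = pvR nums k (t + 1) := by simpa using hp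
      have hmin' : ∀ j : Nat, j < i → pvR nums k j ≠ pvR nums k (t + 1) := by
        intro j hj
        have := hmin j hj
        rw [List.getElem_range] at this
        simpa using this
      have hcont : dic.contains (pvR nums k (t + 1)) = true := by
        rw [PySem.Dict.contains_eq_isSome_get?, hget]; rfl
      have hgetD : dic.getD (pvR nums k (t + 1)) 0 = (i : Int) - 1 := by
        rw [PySem.Dict.getD_eq_get?_getD, hget]; rfl
      rw [hcont, hgetD, if_pos (rfl : true = true)]
      by_cases hgap : i < t
      · rw [if_pos (show ((t : Int) - ((i : Int) - 1) > 1) by omega)]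
        simp only [true_iff]
        exact ⟨i, t + 1, by omega, by omega, by omega, hm₀r⟩
      · have hit : i = t := by omega
        rw [if_neg (show ¬((t : Int) - ((i : Int) - 1) > 1) by omega), hcast]
        rw [IH (t + 1) dic hrest ?_ ?_]
        · constructor
          · rintro ⟨m', m, h1, h2, h3, h4⟩; exact ⟨m', m, h1, h2, by omega, h4⟩
          · rintro ⟨m', m, h1, h2, h3, h4⟩
            by_cases hm : m = t + 1
            · subst hm; exact absurd h4 (hmin' m' (by omega))
            · exact ⟨m', m, h1, h2, by omega, h4⟩
        · intro key
          rw [hdic key]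
          conv_rhs => rw [List.range_succ, List.find?_append]
          cases hf : (List.range (t + 1)).find? (fun m => pvR nums k m == key) with
          | some v => simp
          | none =>
            have hne : (pvR nums k (t + 1) == key) = false := by
              cases hbv : (pvR nums k (t + 1) == key) with
              | false => rfl
              | true =>
                have hkey : pvR nums k (t + 1) = key := eq_of_beq hbv
                rw [← hkey, hfind] at hf
                simp at hf
            simp [List.find?, hne]
        · intro m' m h2 hm hr
          by_cases hm' : m ≤ t
          · exact hnp m' m h2 hm' hr
          · have : m = t + 1 := by omega
            subst this
            exact hmin' m' (by omega) hr

lemma pvBInner (k : Int) : ∀ (rest : List Int) (s : Int),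
    (hcssBInner k s rest = true ↔
      ∃ j : Nat, j < rest.length ∧ PySem.Int.mod (s + (rest.take (j + 1)).sum) k = 0) := by
  intro rest
  induction rest with
  | nil => intro s; simp [hcssBInner]
  | cons x rest IH =>
    intro s
    rw [hcssBInner]
    by_cases h0 : PySem.Int.mod (s + x) k = 0
    · simp only [h0, beq_self_eq_true, if_true, true_iff]
      exact ⟨0, by simp, by simpa using h0⟩
    · have hb : (PySem.Int.mod (s + x) k == 0) = false := by simpa using h0
      simp only [hb, Bool.false_eq_true, if_false]
      rw [IH (s + x)]
      constructor
      · rintro ⟨j, hj, hm⟩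
        exact ⟨j + 1, by simpa using hj, by rw [List.take_succ_cons, List.sum_cons]; rw [← hm]; ring_nf⟩
      · rintro ⟨j, hj, hm⟩
        cases j with
        | zero => exact absurd (by simpa using hm) h0
        | succ j' =>
          refine ⟨j', by simpa using hj, ?_⟩
          rw [List.take_succ_cons, List.sum_cons] at hm
          rw [← hm]; ring_nf

lemma pvBOuter (nums : List Int) (k : Int) (hk : k ≠ 0) :
    ∀ (rest : List Int) (t : Nat), rest = nums.drop t →
    (hcssBOuter k rest = true ↔
      ∃ m' m : Nat, t ≤ m' ∧ m' + 2 ≤ m ∧ m ≤ nums.length ∧ pvR nums k m' = pvR nums k m) := by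
  intro rest
  induction rest with
  | nil =>
    intro t ht
    have hlen : nums.length ≤ t := List.drop_eq_nil_iff.mp ht.symm
    constructor
    · intro h; cases h
    · rintro ⟨m', m, h1, h2, h3, _⟩; omega
  | cons x rest IH =>
    intro t ht
    have ht' : t < nums.length := by
      by_contra h
      rw [List.drop_eq_nil_iff.mpr (by omega)] at ht; cases ht
    have hd := List.drop_eq_getElem_cons ht'
    rw [hd] at ht
    obtain ⟨hx, hrest⟩ : x = nums[t] ∧ rest = nums.drop (t + 1) := by
      injection ht with h1 h2; exact ⟨h1, h2⟩
    have hlen : rest.length = nums.length - (t + 1) := by rw [hrest, List.length_drop]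
    have key : ∀ j : Nat, x + (rest.take (j + 1)).sum = pvPre nums (t + (j + 2)) - pvPre nums t := by
      intro j
      have h := pvSum_drop_take nums t (j + 2)
      rw [hd, List.take_succ_cons, List.sum_cons, ← hx, ← hrest] at h
      exact h
    rw [hcssBOuter, Bool.or_eq_true, pvBInner, IH (t + 1) hrest]
    constructor
    · rintro (⟨j, hj, hm⟩ | ⟨m', m, h1, h2, h3, h4⟩)
      · refine ⟨t, t + (j + 2), le_rfl, by omega, by omega, ?_⟩
        rw [key j] at hm
        have hdvd : k ∣ (pvPre nums (t + (j + 2)) - pvPre nums t) :=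
          (PySem.Int.mod_eq_zero_iff_dvd _ k).mp hm
        exact (pvModEq k _ _ hk).mpr (by simpa using (dvd_neg.mpr hdvd))
      · exact ⟨m', m, by omega, h2, h3, h4⟩
    · rintro ⟨m', m, h1, h2, h3, h4⟩
      by_cases hm' : t + 1 ≤ m'
      · exact Or.inr ⟨m', m, hm', h2, h3, h4⟩
      · have hmt : m' = t := by omega
        subst hmt
        refine Or.inl ⟨m - m' - 2, by omega, ?_⟩
        have hm : m = m' + ((m - m' - 2) + 2) := by omega
        rw [key, (PySem.Int.mod_eq_zero_iff_dvd _ k), ← hm]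
        have := (pvModEq k _ _ hk).mp h4
        simpa using (dvd_neg.mpr this)

-- ===== VERDICT (by name: the statement is the Claim_ definition above) =====
theorem has_continuous_subarray_sum_spec : Claim_equal_has_continuous_subarray_sum := by
  intro nums k _
  unfold Spec_has_continuous_subarray_sum has_continuous_subarray_sum has_continuous_subarray_sum_alt
  by_cases hk : k = 0
  · simp only [hk, beq_self_eq_true, if_true]
    rw [pvAZero nums 0 0 le_rfl]; simp
  · have hk' : (k == 0) = false := by simp [hk]
    simp only [hk', Bool.false_eq_true, if_false]
    have h0 : pvR nums k 0 = 0 := by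
      simp [pvR, pvPre, (PySem.Int.mod_eq_zero_iff_dvd 0 k).mpr (dvd_zero k)]
    have hinv : ∀ key : Int, (PySem.Dict.empty.insert 0 (-1) : PySem.Dict Int Int).get? key =
        (((List.range (0 + 1)).find? (fun m => pvR nums k m == key)).map
          (fun (m : Nat) => (m : Int) - 1)) := by
      intro key
      rw [PySem.Dict.get?_insert]
      by_cases hkey : key = 0
      · subst hkey
        simp [List.range_one, h0]
      · rw [if_neg hkey, PySem.Dict.get?_empty]
        have hne : (pvR nums k 0 == key) = false := by
          rw [h0]; exact beq_eq_false_iff_ne.mpr (fun h => hkey h.symm)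
        simp [List.range_one, List.find?, hne]
    have hA := pvALoop nums k hk nums 0 (PySem.Dict.empty.insert 0 (-1)) rfl hinv
      (by intro m' m h1 h2; exact absurd h2 (by omega))
    rw [h0] at hA
    simp only [Nat.cast_zero] at hA
    have hB := pvBOuter nums k hk nums 0 rfl
    rw [Bool.eq_iff_iff, hA, hB]
    constructor
    · rintro ⟨m', m, h1, h2, _, h4⟩
      exact ⟨m', m, by omega, h1, h2, h4⟩
    · rintro ⟨m', m, _, h2, h3, h4⟩
      exact ⟨m', m, h2, h3, by omega, h4⟩
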